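-- pv_equiv track=rewrite | github.com/leeminHong1990/TaiYuanLiSiMJ | kbengine/assets/scripts/common/utility.py | checkMeldInPossible
-- ===== SOURCE A (Python) =====
-- def isMeld(tiles):
-- 	if (len(tiles) % 3 != 0):
-- 		return False
--
-- 	tilesCopy = sorted(tiles)
-- 	total = sum(tiles)
-- 	magic = total % 3
-- 	if magic == 0:
-- 		while (len(tilesCopy) >= 3):
-- 			left = tilesCopy[0]
-- 			n = tilesCopy.count(left)
-- 			tilesCopy.remove(left)
-- 			if n == 1:
-- 				# 移除一个顺子
-- 				if left + 1 in tilesCopy: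
-- 					tilesCopy.remove(left + 1)
-- 				else:
-- 					return False
-- 				if left + 2 in tilesCopy:
-- 					tilesCopy.remove(left + 2)
-- 				else:
-- 					return False
-- 			elif n == 2:
-- 				# 移除两个顺子
-- 				tilesCopy.remove(left)
-- 				if tilesCopy.count(left + 1) >= 2:
-- 					tilesCopy.remove(left + 1)
-- 					tilesCopy.remove(left + 1)
-- 				else:
-- 					return False
-- 				if tilesCopy.count(left + 2) >= 2:
-- 					tilesCopy.remove(left + 2)
-- 					tilesCopy.remove(left + 2)
-- 				else:
-- 					return False
-- 			else:
-- 				# 移除一个刻子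
-- 				tilesCopy.remove(left)
-- 				tilesCopy.remove(left)
--
-- 	return len(tilesCopy) == 0
--
-- def checkMeldInPossible(tiles, possibleList):
-- 	for i in possibleList:
-- 		if tiles.count(i) >= 2:
-- 			tmp = list(tiles)
-- 			tmp.remove(i)
-- 			tmp.remove(i)
-- 			if isMeld(tmp):
-- 				return True
-- 	return False
-- ===== SOURCE B (Python) =====
-- # B: run-length-encode the sorted tiles once, then for each candidate pair do one
-- # linear greedy scan over the distinct-value groups (m = count % 3 sequences, rest pungs).
-- def _groups(tiles):
--     s = sorted(tiles)
--     groups = []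
--     for t in s:
--         if groups and groups[-1][0] == t:
--             groups[-1] = (t, groups[-1][1] + 1)
--         else:
--             groups.append((t, 1))
--     return groups
--
-- def _count(groups, i):
--     for v, c in groups:
--         if v == i:
--             return c
--     return 0
--
-- def _scan(groups):
--     g = [list(p) for p in groups]
--     for idx in range(len(g)):
--         v, c = g[idx]
--         m = c % 3
--         if m:
--             if (idx + 2 >= len(g) or g[idx + 1][0] != v + 1 or g[idx + 1][1] < m
--                     or g[idx + 2][0] != v + 2 or g[idx + 2][1] < m):
--                 return False
--             g[idx + 1][1] -= m
--             g[idx + 2][1] -= m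
--     return True
--
-- def checkMeldInPossible(tiles, possibleList):
--     if (len(tiles) - 2) % 3 != 0:
--         return False
--     total = sum(tiles)
--     g = _groups(tiles)
--     for i in possibleList:
--         if _count(g, i) >= 2 and (total - 2 * i) % 3 == 0:
--             if _scan([(v, c - 2) if v == i else (v, c) for (v, c) in g]):
--                 return True
--     return False
-- ===== Notes on version B (the rewrite author's own statement) =====
-- stated objective: faster
-- what changed: A copies the tile list and repeatedly scans/erases it per candidate (quadratic passes of count/remove/in); B run-length-encodes the sorted tiles once and, per candidate, decrements the pair in the group list and does one linear greedy scan over distinct values (m = count % 3 sequences, rest triplets), plus an upfront length-mod-3 and sum-mod-3 filter.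
import Mathlib
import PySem

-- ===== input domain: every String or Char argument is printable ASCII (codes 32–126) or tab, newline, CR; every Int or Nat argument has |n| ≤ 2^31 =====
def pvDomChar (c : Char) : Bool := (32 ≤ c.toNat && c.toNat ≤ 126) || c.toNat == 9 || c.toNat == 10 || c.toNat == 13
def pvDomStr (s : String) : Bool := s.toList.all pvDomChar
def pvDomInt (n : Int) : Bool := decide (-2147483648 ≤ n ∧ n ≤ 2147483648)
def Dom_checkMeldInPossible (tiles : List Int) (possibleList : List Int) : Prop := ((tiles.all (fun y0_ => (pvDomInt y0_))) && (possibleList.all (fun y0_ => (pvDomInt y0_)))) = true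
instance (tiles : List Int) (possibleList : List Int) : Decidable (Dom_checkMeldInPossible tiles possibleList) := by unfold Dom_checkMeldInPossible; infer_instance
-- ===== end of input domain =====

-- B re-implements the check by run-length-encoding the sorted tiles once and doing a single
-- linear greedy scan over the distinct-value groups per candidate pair (alternative algorithm).


-- ===== PORT A =====
-- Python's list.remove(v) is only reached by A on a present element, where it equals List.erase.
def pvLoopA (tc : List Int) : Bool :=
  if 3 ≤ tc.length then
    let left := tc.headI
    let n := tc.count left
    let tc1 := tc.erase left
    if n = 1 then
      if (left + 1) ∈ tc1 then
        let tc2 := tc1.erase (left + 1)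
        if (left + 2) ∈ tc2 then pvLoopA (tc2.erase (left + 2)) else false
      else false
    else if n = 2 then
      let tc2 := tc1.erase left
      if 2 ≤ tc2.count (left + 1) then
        let tc3 := (tc2.erase (left + 1)).erase (left + 1)
        if 2 ≤ tc3.count (left + 2) then pvLoopA ((tc3.erase (left + 2)).erase (left + 2))
        else false
      else false
    else pvLoopA ((tc1.erase left).erase left)
  else decide (tc.length = 0)
termination_by tc.length
decreasing_by
  all_goals
    have h1 : tc ≠ [] := by
      intro he; subst he; simp_all
    have h2 : tc.headI ∈ tc := by
      cases tc with
      | nil => exact absurd rfl h1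
      | cons a t => simp [List.headI]
    have h3 := List.length_erase_add_one h2
    all_goals
      first
      | (have h4 : ((tc.erase tc.headI).erase (tc.headI + 1)).length ≤ (tc.erase tc.headI).length := List.length_erase_le
         have h5 : (((tc.erase tc.headI).erase (tc.headI + 1)).erase (tc.headI + 2)).length ≤ ((tc.erase tc.headI).erase (tc.headI + 1)).length := List.length_erase_le
         omega)
      | (have h4 : ((tc.erase tc.headI).erase tc.headI).length ≤ (tc.erase tc.headI).length := List.length_erase_le
         have h5 : (((tc.erase tc.headI).erase tc.headI).erase (tc.headI + 1)).length ≤ ((tc.erase tc.headI).erase tc.headI).length := List.length_erase_le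
         have h6 : ((((tc.erase tc.headI).erase tc.headI).erase (tc.headI + 1)).erase (tc.headI + 1)).length ≤ (((tc.erase tc.headI).erase tc.headI).erase (tc.headI + 1)).length := List.length_erase_le
         have h7 : (((((tc.erase tc.headI).erase tc.headI).erase (tc.headI + 1)).erase (tc.headI + 1)).erase (tc.headI + 2)).length ≤ ((((tc.erase tc.headI).erase tc.headI).erase (tc.headI + 1)).erase (tc.headI + 1)).length := List.length_erase_le
         have h8 : ((((((tc.erase tc.headI).erase tc.headI).erase (tc.headI + 1)).erase (tc.headI + 1)).erase (tc.headI + 2)).erase (tc.headI + 2)).length ≤ (((((tc.erase tc.headI).erase tc.headI).erase (tc.headI + 1)).erase (tc.headI + 1)).erase (tc.headI + 2)).length := List.length_erase_le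
         omega)
      | (have h4 : ((tc.erase tc.headI).erase tc.headI).length ≤ (tc.erase tc.headI).length := List.length_erase_le
         have h5 : (((tc.erase tc.headI).erase tc.headI).erase tc.headI).length ≤ ((tc.erase tc.headI).erase tc.headI).length := List.length_erase_le
         omega)

def isMeldA (tiles : List Int) : Bool :=
  if tiles.length % 3 ≠ 0 then false
  else
    let tilesCopy := PySem.List.sorted tiles (fun x => x) false
    let total := tiles.sum
    let magic := PySem.Int.mod total 3
    if magic = 0 then pvLoopA tilesCopy else decide (tilesCopy.length = 0)

def checkMeldInPossible (tiles : List Int) (possibleList : List Int) : Bool :=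
  possibleList.any fun i =>
    if 2 ≤ tiles.count i then isMeldA ((tiles.erase i).erase i) else false

-- ===== PORT B =====
-- B's python builds the group list by appending / bumping the last entry; the port
-- accumulates in reverse and reverses once (the standard functional rendering of that loop).
def pvGStep (acc : List (Int × Int)) (t : Int) : List (Int × Int) :=
  match acc with
  | (v, c) :: rest => if v = t then (v, c + 1) :: rest else (t, 1) :: (v, c) :: rest
  | [] => [(t, 1)]

def pvGroups (tiles : List Int) : List (Int × Int) :=
  ((PySem.List.sorted tiles (fun x => x) false).foldl pvGStep []).reverse

def pvCountG : List (Int × Int) → Int → Int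
  | [], _ => 0
  | (v, c) :: g, i => if v = i then c else pvCountG g i

-- B's index loop over the groups; fewer than two groups after the current one means
-- python's `idx + 2 >= len(g)` guard fires (the last two patterns).
def pvScan : List (Int × Int) → Bool
  | [] => true
  | [(_, c)] =>
    if PySem.Int.mod c 3 = 0 then true else false
  | [(v, c), (v1, c1)] =>
    if PySem.Int.mod c 3 = 0 then pvScan [(v1, c1)] else false
  | (v, c) :: (v1, c1) :: (v2, c2) :: g3 =>
    let m := PySem.Int.mod c 3
    if m = 0 then pvScan ((v1, c1) :: (v2, c2) :: g3)
    else
      if v1 ≠ v + 1 ∨ c1 < m ∨ v2 ≠ v + 2 ∨ c2 < m then false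
      else pvScan ((v1, c1 - m) :: (v2, c2 - m) :: g3)
termination_by g => g.length
decreasing_by all_goals (simp; try omega)

def checkMeldInPossible_alt (tiles : List Int) (possibleList : List Int) : Bool :=
  if PySem.Int.mod ((tiles.length : Int) - 2) 3 ≠ 0 then false
  else
    let total := tiles.sum
    let g := pvGroups tiles
    possibleList.any fun i =>
      decide (2 ≤ pvCountG g i) &&
        (decide (PySem.Int.mod (total - 2 * i) 3 = 0) &&
          pvScan (g.map fun p => if p.1 = i then (p.1, p.2 - 2) else p))

-- ===== PRECONDITION & SPEC =====
def Spec_checkMeldInPossible (tiles : List Int) (possibleList : List Int) (out : Bool) : Prop := out = checkMeldInPossible_alt tiles possibleList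
instance (tiles : List Int) (possibleList : List Int) (out : Bool) : Decidable (Spec_checkMeldInPossible tiles possibleList out) := by unfold Spec_checkMeldInPossible; infer_instance

-- ===== CLAIM (what is proved, stated in full; the proofs are below) =====
def Claim_equal_checkMeldInPossible : Prop := ∀ (tiles : List Int) (possibleList : List Int), Dom_checkMeldInPossible tiles possibleList → Spec_checkMeldInPossible tiles possibleList (checkMeldInPossible tiles possibleList)

-- ===== LEMMAS AND PROOFS =====

/-- The multiset a group list denotes, flattened in order. -/
def pvExpand : List (Int × Int) → List Int
  | [] => []
  | (v, c) :: g => List.replicate c.toNat v ++ pvExpand g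

theorem pvExpand_append (g1 g2 : List (Int × Int)) :
    pvExpand (g1 ++ g2) = pvExpand g1 ++ pvExpand g2 := by
  induction g1 with
  | nil => simp [pvExpand]
  | cons p g ih => cases p; simp [pvExpand, ih]

theorem pvExpand_notmem (x : Int) (g : List (Int × Int)) (h : ∀ p ∈ g, x < p.1) :
    x ∉ pvExpand g := by
  induction g with
  | nil => simp [pvExpand]
  | cons p g ih =>
    cases p with
    | mk v c =>
      have hx : x < v := h (v, c) (by simp)
      simp only [pvExpand, List.mem_append, List.mem_replicate, not_or]
      constructor
      · intro hc; omega
      · exact ih fun q hq => h q (by simp [hq])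

theorem pvExpand_count_zero (x : Int) (g : List (Int × Int)) (h : ∀ p ∈ g, x < p.1) :
    (pvExpand g).count x = 0 :=
  List.count_eq_zero.2 (pvExpand_notmem x g h)

theorem pvMemOfCountPos (a : Int) (l : List Int) (h : 0 < l.count a) : a ∈ l := by
  by_contra hn
  rw [List.count_eq_zero.2 hn] at h
  omega

theorem pvCountLe (a : Int) (l : List Int) : l.count a ≤ l.length := by
  induction l with
  | nil => simp
  | cons x t ih => by_cases hx : x = a <;> simp [List.count_cons, hx] <;> omega

theorem pvExpand_cons_pos (v c : Int) (g : List (Int × Int)) (hc : 1 ≤ c) :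
    pvExpand ((v, c) :: g) = v :: pvExpand ((v, c - 1) :: g) := by
  have h1 : c.toNat = (c - 1).toNat + 1 := by omega
  show List.replicate c.toNat v ++ pvExpand g
      = v :: (List.replicate (c - 1).toNat v ++ pvExpand g)
  rw [h1, List.replicate_succ]
  rfl

theorem pvExpand_erase_head (v c : Int) (g : List (Int × Int)) (hc : 1 ≤ c) :
    (pvExpand ((v, c) :: g)).erase v = pvExpand ((v, c - 1) :: g) := by
  rw [pvExpand_cons_pos v c g hc, List.erase_cons_head]

theorem pvExpand_erase_skip (x v c : Int) (g : List (Int × Int)) (hx : x ≠ v) :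
    (pvExpand ((v, c) :: g)).erase x = List.replicate c.toNat v ++ (pvExpand g).erase x := by
  show (List.replicate c.toNat v ++ pvExpand g).erase x = _
  refine List.erase_append_right _ ?_
  simp only [List.mem_replicate, not_and]
  intro _ h
  exact hx h

theorem pvCount_expand_head (v c : Int) (g : List (Int × Int)) (hlb : ∀ p ∈ g, v < p.1) :
    (pvExpand ((v, c) :: g)).count v = c.toNat := by
  show (List.replicate c.toNat v ++ pvExpand g).count v = c.toNat
  rw [List.count_append, pvExpand_count_zero v g hlb]
  simp

theorem pvCount_expand_cons (x v c : Int) (g : List (Int × Int)) (hx : x ≠ v) :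
    (pvExpand ((v, c) :: g)).count x = (pvExpand g).count x := by
  have hz : (List.replicate c.toNat v).count x = 0 := by
    refine List.count_eq_zero.2 ?_
    simp only [List.mem_replicate, not_and]
    intro _ h
    exact hx h
  show (List.replicate c.toNat v ++ pvExpand g).count x = _
  rw [List.count_append, hz]
  simp

theorem pvMod3_lt (c : Int) : PySem.Int.mod c 3 < 3 :=
  PySem.Int.mod_lt c (by norm_num)

theorem pvMod3_nonneg (c : Int) : 0 ≤ PySem.Int.mod c 3 :=
  PySem.Int.mod_nonneg c (by norm_num)

theorem pvMod3_emod (c : Int) : PySem.Int.mod c 3 = c % 3 :=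
  PySem.Int.mod_eq_emod_of_pos (by norm_num)

theorem pvMod3_sub (c : Int) : PySem.Int.mod (c - 3) 3 = PySem.Int.mod c 3 := by
  rw [pvMod3_emod, pvMod3_emod]
  omega

theorem pvMod3_small (c : Int) (h0 : 0 ≤ c) (h3 : c < 3) : PySem.Int.mod c 3 = c := by
  rw [pvMod3_emod]
  omega

-- one-step evaluation lemmas for A's loop
theorem pvLoopA_short (tc : List Int) (h : tc.length < 3) :
    pvLoopA tc = decide (tc.length = 0) := by
  rw [pvLoopA]
  rw [if_neg (by omega)]

theorem pvLoopA_nil : pvLoopA [] = true := by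
  rw [pvLoopA_short [] (by simp)]
  simp

theorem pvLoopA_step1 (v : Int) (e : List Int) (hlen : 3 ≤ (v :: e).length)
    (hcv : e.count v = 0) :
    pvLoopA (v :: e) =
      (if (v + 1) ∈ e then
        (if (v + 2) ∈ e.erase (v + 1) then pvLoopA ((e.erase (v + 1)).erase (v + 2)) else false)
       else false) := by
  rw [pvLoopA]
  rw [if_pos hlen]
  simp only [List.headI_cons, List.count_cons_self, hcv, List.erase_cons_head]
  norm_num

theorem pvLoopA_step2 (v : Int) (e : List Int) (hlen : 3 ≤ (v :: v :: e).length)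
    (hcv : e.count v = 0) :
    pvLoopA (v :: v :: e) =
      (if 2 ≤ e.count (v + 1) then
        (if 2 ≤ ((e.erase (v + 1)).erase (v + 1)).count (v + 2) then
           pvLoopA ((((e.erase (v + 1)).erase (v + 1)).erase (v + 2)).erase (v + 2))
         else false)
       else false) := by
  rw [pvLoopA]
  rw [if_pos hlen]
  simp only [List.headI_cons, List.count_cons_self, hcv, List.erase_cons_head]
  norm_num

theorem pvLoopA_step3 (v : Int) (e : List Int) (hlen : 3 ≤ (v :: e).length)
    (h1 : ¬ e.count v + 1 = 1) (h2 : ¬ e.count v + 1 = 2) :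
    pvLoopA (v :: e) = pvLoopA ((e.erase v).erase v) := by
  rw [pvLoopA]
  rw [if_pos hlen]
  simp only [List.headI_cons, List.count_cons_self, List.erase_cons_head]
  rw [if_neg h1, if_neg h2]

theorem pvExpand_length (g : List (Int × Int)) :
    (pvExpand g).length = (g.map (fun p => p.2.toNat)).sum := by
  induction g with
  | nil => simp [pvExpand]
  | cons p g ih => cases p; simp [pvExpand, ih]

theorem pvPeel (v c : Int) (g : List (Int × Int)) (hc : 3 ≤ c)
    (hlb : ∀ p ∈ g, v < p.1) :
    pvLoopA (pvExpand ((v, c) :: g)) = pvLoopA (pvExpand ((v, c - 3) :: g)) := by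
  rw [pvExpand_cons_pos v c g (by omega)]
  have hcv : (pvExpand ((v, c - 1) :: g)).count v = (c - 1).toNat :=
    pvCount_expand_head v (c - 1) g hlb
  have hlen : 3 ≤ (v :: pvExpand ((v, c - 1) :: g)).length := by
    have h1 := pvCountLe v (pvExpand ((v, c - 1) :: g))
    simp only [List.length_cons]
    omega
  rw [pvLoopA_step3 v _ hlen (by omega) (by omega)]
  rw [pvExpand_erase_head v (c - 1) g (by omega)]
  rw [pvExpand_erase_head v (c - 1 - 1) g (by omega)]
  rw [show c - 1 - 1 - 1 = c - 3 from by ring]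

theorem pvPeelMod : ∀ (k : Nat) (v c : Int) (g : List (Int × Int)), c.toNat ≤ k → 0 ≤ c →
    (∀ p ∈ g, v < p.1) →
    pvLoopA (pvExpand ((v, c) :: g)) = pvLoopA (pvExpand ((v, PySem.Int.mod c 3) :: g)) := by
  intro k
  induction k with
  | zero =>
    intro v c g hk h0 hlb
    have hc0 : c = 0 := by omega
    subst hc0
    rw [pvMod3_small 0 (by norm_num) (by norm_num)]
  | succ k ih =>
    intro v c g hk h0 hlb
    by_cases h3 : 3 ≤ c
    · rw [pvPeel v c g h3 hlb, ih v (c - 3) g (by omega) (by omega) hlb, pvMod3_sub]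
    · rw [pvMod3_small c h0 (by omega)]

-- pvScan unfolding helpers
theorem pvScan_nil : pvScan [] = true := by rw [pvScan]

theorem pvScan_cons₀ (v c : Int) :
    pvScan [(v, c)] = (if PySem.Int.mod c 3 = 0 then true else false) := by
  rw [pvScan]

theorem pvScan_cons₁ (v c v1 c1 : Int) :
    pvScan [(v, c), (v1, c1)]
      = (if PySem.Int.mod c 3 = 0 then pvScan [(v1, c1)] else false) := by
  conv_lhs => rw [pvScan]

theorem pvScan_cons₂ (v c v1 c1 v2 c2 : Int) (g3 : List (Int × Int)) :
    pvScan ((v, c) :: (v1, c1) :: (v2, c2) :: g3)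
      = (if PySem.Int.mod c 3 = 0 then pvScan ((v1, c1) :: (v2, c2) :: g3)
         else if v1 ≠ v + 1 ∨ c1 < PySem.Int.mod c 3 ∨ v2 ≠ v + 2 ∨ c2 < PySem.Int.mod c 3 then false
         else pvScan ((v1, c1 - PySem.Int.mod c 3) :: (v2, c2 - PySem.Int.mod c 3) :: g3)) := by
  rw [pvScan]

theorem pvScan_mod (v c : Int) (g : List (Int × Int)) :
    pvScan ((v, c) :: g) = pvScan ((v, PySem.Int.mod c 3) :: g) := by
  have hid := pvMod3_small (PySem.Int.mod c 3) (pvMod3_nonneg c) (pvMod3_lt c)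
  match g with
  | [] => rw [pvScan_cons₀, pvScan_cons₀, hid]
  | [(v1, c1)] => rw [pvScan_cons₁, pvScan_cons₁, hid]
  | (v1, c1) :: (v2, c2) :: g3 => rw [pvScan_cons₂, pvScan_cons₂, hid]

theorem pvScan_skip (v c : Int) (g : List (Int × Int)) (h : PySem.Int.mod c 3 = 0) :
    pvScan ((v, c) :: g) = pvScan g := by
  match g with
  | [] => rw [pvScan_cons₀, if_pos h, pvScan_nil]
  | [(v1, c1)] => rw [pvScan_cons₁, if_pos h]
  | (v1, c1) :: (v2, c2) :: g3 => rw [pvScan_cons₂, if_pos h]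

theorem pvAsc_setCounts (a c b b' d d' : Int) (t : List (Int × Int))
    (h : ((a, b) :: (c, d) :: t).Pairwise (fun p q => p.1 < q.1)) :
    ((a, b') :: (c, d') :: t).Pairwise (fun p q => p.1 < q.1) := by
  rw [List.pairwise_cons] at h ⊢
  obtain ⟨h1, h2⟩ := h
  rw [List.pairwise_cons] at h2 ⊢
  obtain ⟨h3, h4⟩ := h2
  refine ⟨?_, ⟨h3, h4⟩⟩
  intro p hp
  rcases List.mem_cons.1 hp with hp | hp
  · subst hp
    exact h1 (c, d) (by simp)
  · exact h1 p (by simp [hp])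

-- The central lemma: A's destructive loop on the flattened sorted list computes exactly
-- B's greedy per-group scan.
theorem pvMain : ∀ (g : List (Int × Int)), g.Pairwise (fun p q => p.1 < q.1) →
    (∀ p ∈ g, 0 ≤ p.2) → pvLoopA (pvExpand g) = pvScan g
  | [] => by
    intro _ _
    rw [pvScan_nil]
    show pvLoopA [] = true
    exact pvLoopA_nil
  | (v, c) :: g' => by
    intro ha hn
    have h0c : 0 ≤ c := hn (v, c) (by simp)
    have hlb : ∀ p ∈ g', v < p.1 := fun p hp => (List.pairwise_cons.1 ha).1 p hp
    have ha' : g'.Pairwise (fun p q => p.1 < q.1) := (List.pairwise_cons.1 ha).2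
    have hn' : ∀ p ∈ g', 0 ≤ p.2 := fun p hp => hn p (by simp [hp])
    rw [pvPeelMod c.toNat v c g' (le_refl _) h0c hlb]
    rw [pvScan_mod v c g']
    have hr0 : 0 ≤ PySem.Int.mod c 3 := pvMod3_nonneg c
    have hr3 : PySem.Int.mod c 3 < 3 := pvMod3_lt c
    have hcv : (pvExpand g').count v = 0 := pvExpand_count_zero v g' hlb
    rcases (by omega : PySem.Int.mod c 3 = 0 ∨ PySem.Int.mod c 3 = 1 ∨ PySem.Int.mod c 3 = 2) with h | h | h
    all_goals rw [h]
    · -- residue 0: group is all triplets, both sides skip it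
      have he : pvExpand ((v, (0 : Int)) :: g') = pvExpand g' := by
        show List.replicate (0 : Int).toNat v ++ pvExpand g' = pvExpand g'
        simp
      rw [he, pvScan_skip v 0 g' (pvMod3_small 0 (by norm_num) (by norm_num))]
      exact pvMain g' ha' hn'
    · -- residue 1: one sequence v, v+1, v+2 is needed
      have hm1 : PySem.Int.mod (1 : Int) 3 = 1 := pvMod3_small 1 (by norm_num) (by norm_num)
      have hs1 : pvExpand ((v, (1 : Int)) :: g') = v :: pvExpand g' := by
        rw [pvExpand_cons_pos v 1 g' le_rfl]
        rw [show (1 : Int) - 1 = 0 from by ring]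
        show v :: (List.replicate (0 : Int).toNat v ++ pvExpand g') = v :: pvExpand g'
        simp
      rw [hs1]
      rcases g' with _ | ⟨⟨v1, c1⟩, g2⟩
      · rw [pvScan_cons₀, hm1, if_neg (by norm_num)]
        rw [pvLoopA_short _ (by simp [pvExpand])]
        simp [pvExpand]
      · have hv1 : v < v1 := hlb (v1, c1) (by simp)
        have hlb2 : ∀ p ∈ g2, v1 < p.1 := fun p hp => (List.pairwise_cons.1 ha').1 p hp
        have hc1nn : 0 ≤ c1 := hn' (v1, c1) (by simp)
        by_cases hv1e : v1 = v + 1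
        · subst hv1e
          by_cases hc1p : 1 ≤ c1
          · have hcA : (pvExpand ((v + 1, c1) :: g2)).count (v + 1) = c1.toNat :=
              pvCount_expand_head (v + 1) c1 g2 hlb2
            have hmem1 : (v + 1) ∈ pvExpand ((v + 1, c1) :: g2) :=
              pvMemOfCountPos _ _ (by rw [hcA]; omega)
            rcases g2 with _ | ⟨⟨v2, c2⟩, g3⟩
            · -- only two groups: scan fails; A finds v+1 but no v+2
              rw [pvScan_cons₁, hm1, if_neg (by norm_num)]
              by_cases hlen : 3 ≤ (v :: pvExpand [(v + 1, c1)]).length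
              · rw [pvLoopA_step1 v _ hlen hcv, if_pos hmem1]
                rw [pvExpand_erase_head (v + 1) c1 [] hc1p]
                have hz : (pvExpand [(v + 1, c1 - 1)]).count (v + 2) = 0 := by
                  rw [pvCount_expand_cons (v + 2) (v + 1) (c1 - 1) [] (by omega)]
                  simp [pvExpand]
                rw [if_neg (List.count_eq_zero.1 hz)]
              · rw [pvLoopA_short _ (by omega)]
                simp
            · have hv2 : v + 1 < v2 := hlb2 (v2, c2) (by simp)
              have hc2nn : 0 ≤ c2 := hn' (v2, c2) (by simp)
              have hlb3 : ∀ p ∈ g3, v2 < p.1 := fun p hp =>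
                (List.pairwise_cons.1 (List.pairwise_cons.1 ha').2).1 p hp
              rw [pvScan_cons₂, hm1, if_neg (by norm_num)]
              have hcB : (pvExpand ((v + 1, c1 - 1) :: (v2, c2) :: g3)).count (v + 2)
                  = (pvExpand ((v2, c2) :: g3)).count (v + 2) :=
                pvCount_expand_cons (v + 2) (v + 1) (c1 - 1) _ (by omega)
              by_cases hv2e : v2 = v + 2
              · subst hv2e
                have hcC : (pvExpand ((v + 2, c2) :: g3)).count (v + 2) = c2.toNat :=
                  pvCount_expand_head (v + 2) c2 g3 hlb3
                by_cases hc2p : 1 ≤ c2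
                · -- successful sequence: both sides consume one of each
                  rw [if_neg (by omega)]
                  have hlen : 3 ≤ (v :: pvExpand ((v + 1, c1) :: (v + 2, c2) :: g3)).length := by
                    have hL := pvExpand_length ((v + 1, c1) :: (v + 2, c2) :: g3)
                    simp only [List.map_cons, List.sum_cons, List.length_cons] at hL ⊢
                    omega
                  rw [pvLoopA_step1 v _ hlen hcv, if_pos hmem1]
                  rw [pvExpand_erase_head (v + 1) c1 _ hc1p]
                  have hmem2 : (v + 2) ∈ pvExpand ((v + 1, c1 - 1) :: (v + 2, c2) :: g3) :=
                    pvMemOfCountPos _ _ (by rw [hcB, hcC]; omega)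
                  rw [if_pos hmem2]
                  have he2 : (pvExpand ((v + 1, c1 - 1) :: (v + 2, c2) :: g3)).erase (v + 2)
                      = pvExpand ((v + 1, c1 - 1) :: (v + 2, c2 - 1) :: g3) := by
                    rw [pvExpand_erase_skip (v + 2) (v + 1) (c1 - 1) _ (by omega)]
                    rw [pvExpand_erase_head (v + 2) c2 g3 hc2p]
                    rfl
                  rw [he2]
                  refine pvMain ((v + 1, c1 - 1) :: (v + 2, c2 - 1) :: g3) ?_ ?_
                  · exact pvAsc_setCounts _ _ _ _ _ _ _ ha'
                  · intro p hp
                    rcases List.mem_cons.1 hp with hp | hp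
                    · subst hp; simp; omega
                    · rcases List.mem_cons.1 hp with hp | hp
                      · subst hp; simp; omega
                      · exact hn' p (by simp [hp])
                · -- c2 = 0: no v+2 available
                  rw [if_pos (by omega)]
                  by_cases hlen : 3 ≤ (v :: pvExpand ((v + 1, c1) :: (v + 2, c2) :: g3)).length
                  · rw [pvLoopA_step1 v _ hlen hcv, if_pos hmem1]
                    rw [pvExpand_erase_head (v + 1) c1 _ hc1p]
                    rw [if_neg (List.count_eq_zero.1 (by rw [hcB, hcC]; omega))]
                  · rw [pvLoopA_short _ (by omega)]
                    simp
              · -- v2 > v + 2: gap, no v+2 anywhere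
                rw [if_pos (Or.inr (Or.inr (Or.inl hv2e)))]
                have hcC : (pvExpand ((v2, c2) :: g3)).count (v + 2) = 0 := by
                  rw [pvCount_expand_cons (v + 2) v2 c2 g3 (by omega)]
                  exact pvExpand_count_zero (v + 2) g3 (fun p hp => by have := hlb3 p hp; omega)
                by_cases hlen : 3 ≤ (v :: pvExpand ((v + 1, c1) :: (v2, c2) :: g3)).length
                · rw [pvLoopA_step1 v _ hlen hcv, if_pos hmem1]
                  rw [pvExpand_erase_head (v + 1) c1 _ hc1p]
                  rw [if_neg (List.count_eq_zero.1 (by rw [hcB, hcC]))]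
                · rw [pvLoopA_short _ (by omega)]
                  simp
          · -- c1 = 0: the v+1 group is exhausted
            have hcA : (pvExpand ((v + 1, c1) :: g2)).count (v + 1) = c1.toNat :=
              pvCount_expand_head (v + 1) c1 g2 hlb2
            have hnm : (v + 1) ∉ pvExpand ((v + 1, c1) :: g2) :=
              List.count_eq_zero.1 (by rw [hcA]; omega)
            have hAside : pvLoopA (v :: pvExpand ((v + 1, c1) :: g2)) = false := by
              by_cases hlen : 3 ≤ (v :: pvExpand ((v + 1, c1) :: g2)).length
              · rw [pvLoopA_step1 v _ hlen hcv, if_neg hnm]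
              · rw [pvLoopA_short _ (by omega)]
                simp
            rw [hAside]
            rcases g2 with _ | ⟨⟨v2, c2⟩, g3⟩
            · rw [pvScan_cons₁, hm1, if_neg (by norm_num)]
            · rw [pvScan_cons₂, hm1, if_neg (by norm_num), if_pos (by omega)]
        · -- v1 > v + 1: no v+1 at all
          have hnm : (v + 1) ∉ pvExpand ((v1, c1) :: g2) := by
            refine pvExpand_notmem (v + 1) _ ?_
            intro p hp
            rcases List.mem_cons.1 hp with hp | hp
            · subst hp; simp; omega
            · have := hlb2 p hp; omega
          have hAside : pvLoopA (v :: pvExpand ((v1, c1) :: g2)) = false := by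
            by_cases hlen : 3 ≤ (v :: pvExpand ((v1, c1) :: g2)).length
            · rw [pvLoopA_step1 v _ hlen hcv, if_neg hnm]
            · rw [pvLoopA_short _ (by omega)]
              simp
          rw [hAside]
          rcases g2 with _ | ⟨⟨v2, c2⟩, g3⟩
          · rw [pvScan_cons₁, hm1, if_neg (by norm_num)]
          · rw [pvScan_cons₂, hm1, if_neg (by norm_num), if_pos (Or.inl hv1e)]
    · -- residue 2: two sequences v, v+1, v+2 are needed
      have hm2 : PySem.Int.mod (2 : Int) 3 = 2 := pvMod3_small 2 (by norm_num) (by norm_num)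
      have hs2 : pvExpand ((v, (2 : Int)) :: g') = v :: v :: pvExpand g' := by
        rw [pvExpand_cons_pos v 2 g' (by norm_num)]
        rw [show (2 : Int) - 1 = 1 from by ring]
        rw [pvExpand_cons_pos v 1 g' le_rfl]
        rw [show (1 : Int) - 1 = 0 from by ring]
        show v :: v :: (List.replicate (0 : Int).toNat v ++ pvExpand g') = _
        simp
      rw [hs2]
      rcases g' with _ | ⟨⟨v1, c1⟩, g2⟩
      · rw [pvScan_cons₀, hm2, if_neg (by norm_num)]
        rw [pvLoopA_short _ (by simp [pvExpand])]
        simp [pvExpand]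
      · have hv1 : v < v1 := hlb (v1, c1) (by simp)
        have hlb2 : ∀ p ∈ g2, v1 < p.1 := fun p hp => (List.pairwise_cons.1 ha').1 p hp
        have hc1nn : 0 ≤ c1 := hn' (v1, c1) (by simp)
        by_cases hv1e : v1 = v + 1
        · subst hv1e
          have hcA : (pvExpand ((v + 1, c1) :: g2)).count (v + 1) = c1.toNat :=
            pvCount_expand_head (v + 1) c1 g2 hlb2
          by_cases hc1p : 2 ≤ c1
          · have he1 : ((pvExpand ((v + 1, c1) :: g2)).erase (v + 1)).erase (v + 1)
                = pvExpand ((v + 1, c1 - 2) :: g2) := by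
              rw [pvExpand_erase_head (v + 1) c1 g2 (by omega)]
              rw [pvExpand_erase_head (v + 1) (c1 - 1) g2 (by omega)]
              rw [show c1 - 1 - 1 = c1 - 2 from by ring]
            rcases g2 with _ | ⟨⟨v2, c2⟩, g3⟩
            · rw [pvScan_cons₁, hm2, if_neg (by norm_num)]
              by_cases hlen : 3 ≤ (v :: v :: pvExpand [(v + 1, c1)]).length
              · rw [pvLoopA_step2 v _ hlen hcv, hcA, if_pos (by omega), he1]
                have hz : (pvExpand [(v + 1, c1 - 2)]).count (v + 2) = 0 := by
                  rw [pvCount_expand_cons (v + 2) (v + 1) (c1 - 2) [] (by omega)]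
                  simp [pvExpand]
                rw [hz, if_neg (by omega)]
              · rw [pvLoopA_short _ (by omega)]
                simp
            · have hv2 : v + 1 < v2 := hlb2 (v2, c2) (by simp)
              have hc2nn : 0 ≤ c2 := hn' (v2, c2) (by simp)
              have hlb3 : ∀ p ∈ g3, v2 < p.1 := fun p hp =>
                (List.pairwise_cons.1 (List.pairwise_cons.1 ha').2).1 p hp
              rw [pvScan_cons₂, hm2, if_neg (by norm_num)]
              have hcB : (pvExpand ((v + 1, c1 - 2) :: (v2, c2) :: g3)).count (v + 2)
                  = (pvExpand ((v2, c2) :: g3)).count (v + 2) :=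
                pvCount_expand_cons (v + 2) (v + 1) (c1 - 2) _ (by omega)
              by_cases hv2e : v2 = v + 2
              · subst hv2e
                have hcC : (pvExpand ((v + 2, c2) :: g3)).count (v + 2) = c2.toNat :=
                  pvCount_expand_head (v + 2) c2 g3 hlb3
                by_cases hc2p : 2 ≤ c2
                · -- success: consume two of each of v+1, v+2
                  rw [if_neg (by omega)]
                  have hlen : 3 ≤ (v :: v :: pvExpand ((v + 1, c1) :: (v + 2, c2) :: g3)).length := by
                    have hL := pvExpand_length ((v + 1, c1) :: (v + 2, c2) :: g3)
                    simp only [List.map_cons, List.sum_cons, List.length_cons] at hL ⊢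
                    omega
                  rw [pvLoopA_step2 v _ hlen hcv, hcA, if_pos (by omega), he1]
                  rw [hcB, hcC, if_pos (by omega)]
                  have he2 : ((pvExpand ((v + 1, c1 - 2) :: (v + 2, c2) :: g3)).erase (v + 2)).erase (v + 2)
                      = pvExpand ((v + 1, c1 - 2) :: (v + 2, c2 - 2) :: g3) := by
                    rw [pvExpand_erase_skip (v + 2) (v + 1) (c1 - 2) _ (by omega)]
                    rw [pvExpand_erase_head (v + 2) c2 g3 (by omega)]
                    show (pvExpand ((v + 1, c1 - 2) :: (v + 2, c2 - 1) :: g3)).erase (v + 2) = _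
                    rw [pvExpand_erase_skip (v + 2) (v + 1) (c1 - 2) _ (by omega)]
                    rw [pvExpand_erase_head (v + 2) (c2 - 1) g3 (by omega)]
                    rw [show c2 - 1 - 1 = c2 - 2 from by ring]
                    rfl
                  rw [he2]
                  refine pvMain ((v + 1, c1 - 2) :: (v + 2, c2 - 2) :: g3) ?_ ?_
                  · exact pvAsc_setCounts _ _ _ _ _ _ _ ha'
                  · intro p hp
                    rcases List.mem_cons.1 hp with hp | hp
                    · subst hp; simp; omega
                    · rcases List.mem_cons.1 hp with hp | hp
                      · subst hp; simp; omega
                      · exact hn' p (by simp [hp])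
                · -- fewer than two v+2
                  rw [if_pos (by omega)]
                  by_cases hlen : 3 ≤ (v :: v :: pvExpand ((v + 1, c1) :: (v + 2, c2) :: g3)).length
                  · rw [pvLoopA_step2 v _ hlen hcv, hcA, if_pos (by omega), he1]
                    rw [hcB, hcC, if_neg (by omega)]
                  · rw [pvLoopA_short _ (by omega)]
                    simp
              · -- v2 > v+2
                rw [if_pos (Or.inr (Or.inr (Or.inl hv2e)))]
                have hcC : (pvExpand ((v2, c2) :: g3)).count (v + 2) = 0 := by
                  rw [pvCount_expand_cons (v + 2) v2 c2 g3 (by omega)]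
                  exact pvExpand_count_zero (v + 2) g3 (fun p hp => by have := hlb3 p hp; omega)
                by_cases hlen : 3 ≤ (v :: v :: pvExpand ((v + 1, c1) :: (v2, c2) :: g3)).length
                · rw [pvLoopA_step2 v _ hlen hcv, hcA, if_pos (by omega), he1]
                  rw [hcB, hcC, if_neg (by omega)]
                · rw [pvLoopA_short _ (by omega)]
                  simp
          · -- fewer than two v+1
            have hAside : pvLoopA (v :: v :: pvExpand ((v + 1, c1) :: g2)) = false := by
              by_cases hlen : 3 ≤ (v :: v :: pvExpand ((v + 1, c1) :: g2)).length
              · rw [pvLoopA_step2 v _ hlen hcv, hcA, if_neg (by omega)]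
              · rw [pvLoopA_short _ (by omega)]
                simp
            rw [hAside]
            rcases g2 with _ | ⟨⟨v2, c2⟩, g3⟩
            · rw [pvScan_cons₁, hm2, if_neg (by norm_num)]
            · rw [pvScan_cons₂, hm2, if_neg (by norm_num), if_pos (by omega)]
        · -- v1 > v+1: no v+1 group
          have hcA : (pvExpand ((v1, c1) :: g2)).count (v + 1) = 0 := by
            rw [pvCount_expand_cons (v + 1) v1 c1 g2 (by omega)]
            exact pvExpand_count_zero (v + 1) g2 (fun p hp => by have := hlb2 p hp; omega)
          have hAside : pvLoopA (v :: v :: pvExpand ((v1, c1) :: g2)) = false := by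
            by_cases hlen : 3 ≤ (v :: v :: pvExpand ((v1, c1) :: g2)).length
            · rw [pvLoopA_step2 v _ hlen hcv, hcA, if_neg (by omega)]
            · rw [pvLoopA_short _ (by omega)]
              simp
          rw [hAside]
          rcases g2 with _ | ⟨⟨v2, c2⟩, g3⟩
          · rw [pvScan_cons₁, hm2, if_neg (by norm_num)]
          · rw [pvScan_cons₂, hm2, if_neg (by norm_num), if_pos (Or.inl hv1e)]
termination_by g => g.length
decreasing_by all_goals (simp; try omega)

-- pvGroups produces exactly the run-length encoding of the sorted list
theorem pvGroupsAux : ∀ (s : List Int) (v c : Int) (rest : List (Int × Int)),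
    1 ≤ c → (∀ x ∈ s, v ≤ x) → s.Pairwise (· ≤ ·) →
    ((v, c) :: rest).Pairwise (fun a b => b.1 < a.1) → (∀ p ∈ (v, c) :: rest, 1 ≤ p.2) →
    pvExpand ((s.foldl pvGStep ((v, c) :: rest)).reverse)
        = pvExpand (((v, c) :: rest).reverse) ++ s
      ∧ (s.foldl pvGStep ((v, c) :: rest)).Pairwise (fun a b => b.1 < a.1)
      ∧ (∀ p ∈ s.foldl pvGStep ((v, c) :: rest), 1 ≤ p.2) := by
  intro s
  induction s with
  | nil =>
    intro v c rest hc _ _ hdesc hpos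
    exact ⟨by simp, hdesc, hpos⟩
  | cons t s' ih =>
    intro v c rest hc hlow hpw hdesc hpos
    have hvt : v ≤ t := hlow t (by simp)
    have hlow' : ∀ x ∈ s', t ≤ x := fun x hx => (List.pairwise_cons.1 hpw).1 x hx
    have hpw' : s'.Pairwise (· ≤ ·) := (List.pairwise_cons.1 hpw).2
    by_cases hvt' : v = t
    · subst hvt'
      have hstep : pvGStep ((v, c) :: rest) v = (v, c + 1) :: rest := by
        simp [pvGStep]
      rw [List.foldl_cons, hstep]
      have hdesc' : ((v, c + 1) :: rest).Pairwise (fun a b => b.1 < a.1) := by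
        rw [List.pairwise_cons] at hdesc ⊢
        exact ⟨hdesc.1, hdesc.2⟩
      have hpos' : ∀ p ∈ (v, c + 1) :: rest, 1 ≤ p.2 := by
        intro p hp
        rcases List.mem_cons.1 hp with hp | hp
        · subst hp; simp; omega
        · exact hpos p (by simp [hp])
      obtain ⟨he, hd, hq⟩ := ih v (c + 1) rest (by omega) hlow' hpw' hdesc' hpos'
      refine ⟨?_, hd, hq⟩
      rw [he]
      have hrep : pvExpand (((v, c + 1) :: rest).reverse)
          = pvExpand (((v, c) :: rest).reverse) ++ [v] := by
        rw [List.reverse_cons, List.reverse_cons, pvExpand_append, pvExpand_append]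
        have h1 : (c + 1).toNat = c.toNat + 1 := by omega
        show _ ++ (List.replicate (c + 1).toNat v ++ pvExpand [])
            = (_ ++ (List.replicate c.toNat v ++ pvExpand [])) ++ [v]
        rw [h1, List.replicate_succ']
        simp [pvExpand]
      rw [hrep]
      simp
    · have hvt2 : v < t := by omega
      have hstep : pvGStep ((v, c) :: rest) t = (t, 1) :: (v, c) :: rest := by
        simp [pvGStep, hvt']
      rw [List.foldl_cons, hstep]
      have hdesc' : ((t, 1) :: (v, c) :: rest).Pairwise (fun a b => b.1 < a.1) := by
        rw [List.pairwise_cons]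
        refine ⟨?_, hdesc⟩
        intro p hp
        rcases List.mem_cons.1 hp with hp | hp
        · subst hp; simpa using hvt2
        · have := (List.pairwise_cons.1 hdesc).1 p hp
          simp at this ⊢
          omega
      have hpos' : ∀ p ∈ (t, 1) :: (v, c) :: rest, 1 ≤ p.2 := by
        intro p hp
        rcases List.mem_cons.1 hp with hp | hp
        · subst hp; simp
        · exact hpos p hp
      obtain ⟨he, hd, hq⟩ := ih t 1 ((v, c) :: rest) (by norm_num) hlow' hpw' hdesc' hpos'
      refine ⟨?_, hd, hq⟩
      rw [he]
      have hrep : pvExpand (((t, 1) :: (v, c) :: rest).reverse)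
          = pvExpand (((v, c) :: rest).reverse) ++ [t] := by
        rw [List.reverse_cons, pvExpand_append]
        show _ ++ (List.replicate (1 : Int).toNat t ++ pvExpand []) = _ ++ [t]
        simp [pvExpand]
      rw [hrep]
      simp

theorem pvGroupsSpec (tiles : List Int) :
    pvExpand (pvGroups tiles) = PySem.List.sorted tiles (fun x => x) false
      ∧ (pvGroups tiles).Pairwise (fun p q => p.1 < q.1)
      ∧ (∀ p ∈ pvGroups tiles, 1 ≤ p.2) := by
  unfold pvGroups
  have hpw : (PySem.List.sorted tiles (fun x => x) false).Pairwise (fun a b => a ≤ b) :=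
    PySem.List.sorted_pairwise tiles (fun x => x)
  cases hs : PySem.List.sorted tiles (fun x => x) false with
  | nil =>
    simp [pvExpand]
  | cons t s' =>
    rw [hs] at hpw
    have hlow : ∀ x ∈ s', t ≤ x := fun x hx => (List.pairwise_cons.1 hpw).1 x hx
    have hpw' : s'.Pairwise (· ≤ ·) := (List.pairwise_cons.1 hpw).2
    have hstep : pvGStep [] t = [(t, 1)] := by simp [pvGStep]
    rw [List.foldl_cons, hstep]
    obtain ⟨he, hd, hq⟩ := pvGroupsAux s' t 1 [] (by norm_num) hlow hpw'
      (by simp) (by simp)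
    refine ⟨?_, ?_, ?_⟩
    · rw [he]
      show pvExpand [(t, 1)].reverse ++ s' = t :: s'
      simp [pvExpand]
    · rw [List.pairwise_reverse]
      exact hd
    · intro p hp
      exact hq p (List.mem_reverse.1 hp)

theorem pvCountG_eq (g : List (Int × Int)) (i : Int)
    (ha : g.Pairwise (fun p q => p.1 < q.1)) :
    (pvExpand g).count i = (pvCountG g i).toNat := by
  induction g with
  | nil => simp [pvExpand, pvCountG]
  | cons p g' ih =>
    cases p with
    | mk v c =>
      have hlb : ∀ q ∈ g', v < q.1 := fun q hq => (List.pairwise_cons.1 ha).1 q hq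
      by_cases hv : v = i
      · subst hv
        rw [pvCount_expand_head v c g' hlb]
        simp [pvCountG]
      · rw [pvCount_expand_cons i v c g' (fun hh => hv hh.symm)]
        rw [ih ((List.pairwise_cons.1 ha).2)]
        simp [pvCountG, hv]

theorem pvMapFix (f : (Int × Int) → (Int × Int)) (l : List (Int × Int))
    (h : ∀ q ∈ l, f q = q) : l.map f = l := by
  induction l with
  | nil => simp
  | cons x t ih =>
    rw [List.map_cons, h x (by simp), ih (fun q hq => h q (by simp [hq]))]

theorem pvExpand_dec (g : List (Int × Int)) (i : Int)
    (ha : g.Pairwise (fun p q => p.1 < q.1)) (h2 : 2 ≤ pvCountG g i) :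
    pvExpand (g.map fun p => if p.1 = i then (p.1, p.2 - 2) else p)
      = ((pvExpand g).erase i).erase i := by
  induction g with
  | nil => simp [pvCountG] at h2
  | cons p g' ih =>
    cases p with
    | mk v c =>
    have hlb : ∀ q ∈ g', v < q.1 := fun q hq => (List.pairwise_cons.1 ha).1 q hq
    have ha' : g'.Pairwise (fun p q => p.1 < q.1) := (List.pairwise_cons.1 ha).2
    by_cases hv : v = i
    · subst hv
      have hcg : pvCountG ((v, c) :: g') v = c := by simp [pvCountG]
      rw [hcg] at h2
      have hmap : g'.map (fun p => if p.1 = v then (p.1, p.2 - 2) else p) = g' := by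
        refine pvMapFix _ _ ?_
        intro q hq
        have := hlb q hq
        rw [if_neg (by omega)]
      simp only [List.map_cons, hmap]
      rw [pvExpand_erase_head v c g' (by omega)]
      rw [pvExpand_erase_head v (c - 1) g' (by omega)]
      rw [show c - 1 - 1 = c - 2 from by ring]
      simp
    · have hcg : pvCountG ((v, c) :: g') i = pvCountG g' i := by simp [pvCountG, hv]
      rw [hcg] at h2
      simp only [List.map_cons, if_neg hv]
      rw [pvExpand_erase_skip i v c g' (fun hh => hv hh.symm)]
      rw [List.erase_append_right _ (by
        simp only [List.mem_replicate, not_and]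
        intro _ hh
        exact hv hh.symm)]
      show List.replicate c.toNat v ++ pvExpand (g'.map _) = _
      rw [ih ha' h2]

theorem pvCountG_unique (g : List (Int × Int)) (i c' : Int)
    (ha : g.Pairwise (fun p q => p.1 < q.1)) (hm : (i, c') ∈ g) : pvCountG g i = c' := by
  induction g with
  | nil => cases hm
  | cons p g' ih =>
    cases p with
    | mk v c =>
    have hlb : ∀ q ∈ g', v < q.1 := fun q hq => (List.pairwise_cons.1 ha).1 q hq
    rcases List.mem_cons.1 hm with hp | hp
    · injection hp with h1 h2
      subst h1
      subst h2
      simp [pvCountG]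
    · have hne : v ≠ i := by
        have := hlb (i, c') hp
        simp at this
        omega
      simp only [pvCountG, if_neg hne]
      exact ih ((List.pairwise_cons.1 ha).2) hp

theorem pvAsc_map_dec (g : List (Int × Int)) (i : Int)
    (ha : g.Pairwise (fun p q => p.1 < q.1)) :
    (g.map fun p => if p.1 = i then (p.1, p.2 - 2) else p).Pairwise (fun p q => p.1 < q.1) := by
  rw [List.pairwise_map]
  refine ha.imp ?_
  intro a b hab
  by_cases h1 : a.1 = i <;> by_cases h2 : b.1 = i <;> simp [h1, h2] <;> omega

theorem pvNN_map_dec (g : List (Int × Int)) (i : Int)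
    (ha : g.Pairwise (fun p q => p.1 < q.1))
    (hpos : ∀ p ∈ g, 1 ≤ p.2) (h2 : 2 ≤ pvCountG g i) :
    ∀ p ∈ (g.map fun p => if p.1 = i then (p.1, p.2 - 2) else p), 0 ≤ p.2 := by
  intro p hp
  rw [List.mem_map] at hp
  obtain ⟨q, hq, hpq⟩ := hp
  by_cases hqi : q.1 = i
  · have hqv : q = (i, q.2) := by
      cases q; simp at hqi; simp [hqi]
    have hcq : pvCountG g i = q.2 := pvCountG_unique g i q.2 ha (hqv ▸ hq)
    rw [if_pos hqi] at hpq
    subst hpq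
    simp
    omega
  · rw [if_neg hqi] at hpq
    subst hpq
    have := hpos q hq
    omega

theorem pvSum_erase (l : List Int) (i : Int) (h : i ∈ l) :
    (l.erase i).sum = l.sum - i := by
  induction l with
  | nil => cases h
  | cons x t ih =>
    by_cases hx : x = i
    · subst hx
      rw [List.erase_cons_head]
      simp [List.sum_cons]
    · have hmem : i ∈ t := by
        rcases List.mem_cons.1 h with h' | h'
        · exact absurd h'.symm hx
        · exact h'
      rw [List.erase_cons_tail (by simp [hx])]
      simp only [List.sum_cons, ih hmem]
      ring

theorem pvSortedErase2 (tiles : List Int) (i : Int)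
    (h1 : i ∈ tiles) (h2 : i ∈ tiles.erase i) :
    PySem.List.sorted ((tiles.erase i).erase i) (fun x => x) false
      = ((PySem.List.sorted tiles (fun x => x) false).erase i).erase i := by
  apply PySem.List.sorted_id_eq_of_perm_of_pairwise
  · exact ((PySem.List.sorted_perm tiles (fun x => x) false).erase i).erase i
  · have hpw : (PySem.List.sorted tiles (fun x => x) false).Pairwise (fun a b => a ≤ b) :=
      PySem.List.sorted_pairwise tiles (fun x => x)
    exact List.Pairwise.sublist ((List.erase_sublist).trans (List.erase_sublist)) hpw

-- per-candidate equality
theorem pvPerCand (tiles : List Int) (i : Int)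
    (hmod : PySem.Int.mod ((tiles.length : Int) - 2) 3 = 0) :
    (if 2 ≤ tiles.count i then isMeldA ((tiles.erase i).erase i) else false)
      = (decide (2 ≤ pvCountG (pvGroups tiles) i) &&
         (decide (PySem.Int.mod (tiles.sum - 2 * i) 3 = 0) &&
          pvScan ((pvGroups tiles).map fun p => if p.1 = i then (p.1, p.2 - 2) else p))) := by
  obtain ⟨hexp, hasc, hpos⟩ := pvGroupsSpec tiles
  have hcnt : tiles.count i = (pvCountG (pvGroups tiles) i).toNat := by
    have h1 : (PySem.List.sorted tiles (fun x => x) false).count i = tiles.count i :=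
      (PySem.List.sorted_perm tiles (fun x => x) false).count_eq i
    rw [← h1, ← hexp]
    exact pvCountG_eq (pvGroups tiles) i hasc
  by_cases h2 : 2 ≤ tiles.count i
  · have h2' : 2 ≤ pvCountG (pvGroups tiles) i := by omega
    rw [if_pos h2, decide_eq_true h2', Bool.true_and]
    have hmem1 : i ∈ tiles := pvMemOfCountPos i tiles (by omega)
    have hce : (tiles.erase i).count i = tiles.count i - 1 := List.count_erase_self
    have hmem2 : i ∈ tiles.erase i := pvMemOfCountPos i _ (by omega)
    have hlen1 : (tiles.erase i).length + 1 = tiles.length := List.length_erase_add_one hmem1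
    have hlen2 : ((tiles.erase i).erase i).length + 1 = (tiles.erase i).length :=
      List.length_erase_add_one hmem2
    have hsum : ((tiles.erase i).erase i).sum = tiles.sum - 2 * i := by
      rw [pvSum_erase _ _ hmem2, pvSum_erase _ _ hmem1]
      ring
    unfold isMeldA
    rw [pvMod3_emod] at hmod
    rw [if_neg (by
      simp only [ne_eq, not_not]
      omega)]
    simp only [hsum]
    by_cases hm : PySem.Int.mod (tiles.sum - 2 * i) 3 = 0
    · rw [if_pos hm, decide_eq_true hm, Bool.true_and]
      rw [pvSortedErase2 tiles i hmem1 hmem2]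
      rw [← hexp]
      rw [← pvExpand_dec (pvGroups tiles) i hasc h2']
      exact pvMain _ (pvAsc_map_dec _ i hasc) (pvNN_map_dec _ i hasc hpos h2')
    · rw [if_neg hm, decide_eq_false hm, Bool.false_and]
      have hne : ¬ (PySem.List.sorted ((tiles.erase i).erase i) (fun x => x) false).length = 0 := by
        intro h0
        rw [PySem.List.length_sorted] at h0
        have hnil : (tiles.erase i).erase i = [] := List.length_eq_zero_iff.1 h0
        rw [hnil] at hsum
        simp at hsum
        rw [pvMod3_emod] at hm
        omega
      exact decide_eq_false hne
  · rw [if_neg h2]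
    have h2' : ¬ 2 ≤ pvCountG (pvGroups tiles) i := by omega
    rw [decide_eq_false h2']
    simp

theorem pvTopEq (tiles possibleList : List Int) :
    checkMeldInPossible tiles possibleList = checkMeldInPossible_alt tiles possibleList := by
  unfold checkMeldInPossible checkMeldInPossible_alt
  by_cases hmod : PySem.Int.mod ((tiles.length : Int) - 2) 3 = 0
  · rw [if_neg (not_not_intro hmod)]
    show (possibleList.any fun i =>
        if 2 ≤ tiles.count i then isMeldA ((tiles.erase i).erase i) else false)
      = possibleList.any fun i =>
        decide (2 ≤ pvCountG (pvGroups tiles) i) &&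
          (decide (PySem.Int.mod (tiles.sum - 2 * i) 3 = 0) &&
            pvScan ((pvGroups tiles).map fun p => if p.1 = i then (p.1, p.2 - 2) else p))
    induction possibleList with
    | nil => simp
    | cons j t ih =>
      simp only [List.any_cons]
      rw [pvPerCand tiles j hmod, ih]
  · rw [if_pos hmod]
    rw [List.any_eq_false]
    intro i _
    by_cases h2 : 2 ≤ tiles.count i
    · rw [if_pos h2]
      have hmem1 : i ∈ tiles := pvMemOfCountPos i tiles (by omega)
      have hce : (tiles.erase i).count i = tiles.count i - 1 := List.count_erase_self
      have hmem2 : i ∈ tiles.erase i := pvMemOfCountPos i _ (by omega)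
      have hlen1 : (tiles.erase i).length + 1 = tiles.length := List.length_erase_add_one hmem1
      have hlen2 : ((tiles.erase i).erase i).length + 1 = (tiles.erase i).length :=
        List.length_erase_add_one hmem2
      unfold isMeldA
      rw [pvMod3_emod] at hmod
      rw [if_pos (by
        simp only [ne_eq]
        omega)]
      simp
    · rw [if_neg h2]
      simp

-- ===== VERDICT (by name: the statement is the Claim_ definition above) =====
theorem checkMeldInPossible_spec : Claim_equal_checkMeldInPossible := by
  intro tiles possibleList _
  exact pvTopEq tiles possibleList
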